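-- pv_equiv track=rewrite | github.com/Koustubh741/ASSET-MANAGER | backend/verify_smart_id.py | get_asset_letter
-- ===== SOURCE A (Python) =====
-- def get_asset_letter(category, subject):
--     """Maps ticket category/subject to the Asset Letter Matrix."""
--     cat = (category or '').upper()
--     sub = (subject or '').upper()
--
--     if 'SERVER' in cat or 'SERVER' in sub: return 'S'
--     if 'LAPTOP' in cat or 'LAPTOP' in sub: return 'L'
--     if 'DESKTOP' in cat or 'DESKTOP' in sub: return 'D'
--     if any(x in cat for x in ['NETWORK', 'WIFI', 'VPN']) or any(x in sub for x in ['NETWORK', 'WIFI']): return 'N'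
--     if any(x in cat for x in ['MOBILE', 'PHONE']) or any(x in sub for x in ['PHONE', 'MOBILE']): return 'M'
--     if any(x in cat for x in ['SOFTWARE', 'APP', 'LICENSE']) or any(x in sub for x in ['SOFTWARE', 'APP']): return 'A'
--     if any(x in cat for x in ['STORAGE', 'DRIVE', 'NAS']) or 'DISK' in sub: return 'T'
--     if any(x in cat for x in ['PERIPHERAL', 'PRINTER', 'MOUSE', 'KEYBOARD']) or any(x in sub for x in ['PRINTER', 'JAM']): return 'P'
--     if 'VIRTUAL' in cat or 'VM' in cat or 'VIRTUAL' in sub: return 'V'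
--     if 'HARDWARE' in cat or 'HARDWARE' in sub: return 'H'
--     return 'O' # Fallback to OTHER
-- ===== SOURCE B (Python) =====
-- # Flat keyword index per field + min-priority accumulator + letter lookup table.
-- CAT_KEYS = [('SERVER', 0), ('LAPTOP', 1), ('DESKTOP', 2),
--             ('NETWORK', 3), ('WIFI', 3), ('VPN', 3),
--             ('MOBILE', 4), ('PHONE', 4),
--             ('SOFTWARE', 5), ('APP', 5), ('LICENSE', 5),
--             ('STORAGE', 6), ('DRIVE', 6), ('NAS', 6),
--             ('PERIPHERAL', 7), ('PRINTER', 7), ('MOUSE', 7), ('KEYBOARD', 7),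
--             ('VIRTUAL', 8), ('VM', 8),
--             ('HARDWARE', 9)]
-- SUB_KEYS = [('SERVER', 0), ('LAPTOP', 1), ('DESKTOP', 2),
--             ('NETWORK', 3), ('WIFI', 3),
--             ('PHONE', 4), ('MOBILE', 4),
--             ('SOFTWARE', 5), ('APP', 5),
--             ('DISK', 6),
--             ('PRINTER', 7), ('JAM', 7),
--             ('VIRTUAL', 8), ('HARDWARE', 9)]
-- LETTERS = ['S','L','D','N','M','A','T','P','V','H','O']
--
-- def get_asset_letter(category, subject):
--     """Maps ticket category/subject to the Asset Letter Matrix."""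
--     cat = (category or '').upper()
--     sub = (subject or '').upper()
--     best = 10
--     for kw, p in CAT_KEYS:
--         if p < best and kw in cat:
--             best = p
--     for kw, p in SUB_KEYS:
--         if p < best and kw in sub:
--             best = p
--     return LETTERS[best]
-- ===== Notes on version B (the rewrite author's own statement) =====
-- stated objective: alternative
-- what changed: Replaced the ten-branch if-chain of ordered first-match checks by two staged passes over flat per-field keyword indexes that accumulate the minimum matched priority, followed by a lookup into a letter table.
import Mathlib
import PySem

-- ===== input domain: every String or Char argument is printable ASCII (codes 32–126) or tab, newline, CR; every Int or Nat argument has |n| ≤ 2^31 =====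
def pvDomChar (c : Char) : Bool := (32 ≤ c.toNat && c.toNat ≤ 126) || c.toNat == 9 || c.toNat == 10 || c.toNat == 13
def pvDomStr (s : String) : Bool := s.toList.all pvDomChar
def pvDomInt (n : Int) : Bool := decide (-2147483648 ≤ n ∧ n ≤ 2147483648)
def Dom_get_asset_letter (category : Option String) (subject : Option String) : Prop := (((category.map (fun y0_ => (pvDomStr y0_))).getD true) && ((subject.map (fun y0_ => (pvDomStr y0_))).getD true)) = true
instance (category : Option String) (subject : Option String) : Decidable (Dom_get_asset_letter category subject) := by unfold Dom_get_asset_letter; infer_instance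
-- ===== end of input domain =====

-- B replaces A's ten-branch ordered if-chain by two staged passes over flat per-field
-- keyword indexes that accumulate the minimum matched priority, then a letter-table lookup.

-- ===== PORT A =====
def get_asset_letter (category : Option String) (subject : Option String) : String :=
  let cat := PySem.Str.upper (category.getD "")
  let sub := PySem.Str.upper (subject.getD "")
  if PySem.Str.isIn "SERVER" cat || PySem.Str.isIn "SERVER" sub then "S"
  else if PySem.Str.isIn "LAPTOP" cat || PySem.Str.isIn "LAPTOP" sub then "L"
  else if PySem.Str.isIn "DESKTOP" cat || PySem.Str.isIn "DESKTOP" sub then "D"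
  else if (["NETWORK", "WIFI", "VPN"].any fun x => PySem.Str.isIn x cat) ||
          (["NETWORK", "WIFI"].any fun x => PySem.Str.isIn x sub) then "N"
  else if (["MOBILE", "PHONE"].any fun x => PySem.Str.isIn x cat) ||
          (["PHONE", "MOBILE"].any fun x => PySem.Str.isIn x sub) then "M"
  else if (["SOFTWARE", "APP", "LICENSE"].any fun x => PySem.Str.isIn x cat) ||
          (["SOFTWARE", "APP"].any fun x => PySem.Str.isIn x sub) then "A"
  else if (["STORAGE", "DRIVE", "NAS"].any fun x => PySem.Str.isIn x cat) ||
          PySem.Str.isIn "DISK" sub then "T"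
  else if (["PERIPHERAL", "PRINTER", "MOUSE", "KEYBOARD"].any fun x => PySem.Str.isIn x cat) ||
          (["PRINTER", "JAM"].any fun x => PySem.Str.isIn x sub) then "P"
  else if PySem.Str.isIn "VIRTUAL" cat || PySem.Str.isIn "VM" cat || PySem.Str.isIn "VIRTUAL" sub then "V"
  else if PySem.Str.isIn "HARDWARE" cat || PySem.Str.isIn "HARDWARE" sub then "H"
  else "O"

-- ===== PORT B =====
def pvCatKeys : List (String × Int) :=
  [("SERVER", 0), ("LAPTOP", 1), ("DESKTOP", 2),
   ("NETWORK", 3), ("WIFI", 3), ("VPN", 3),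
   ("MOBILE", 4), ("PHONE", 4),
   ("SOFTWARE", 5), ("APP", 5), ("LICENSE", 5),
   ("STORAGE", 6), ("DRIVE", 6), ("NAS", 6),
   ("PERIPHERAL", 7), ("PRINTER", 7), ("MOUSE", 7), ("KEYBOARD", 7),
   ("VIRTUAL", 8), ("VM", 8),
   ("HARDWARE", 9)]

def pvSubKeys : List (String × Int) :=
  [("SERVER", 0), ("LAPTOP", 1), ("DESKTOP", 2),
   ("NETWORK", 3), ("WIFI", 3),
   ("PHONE", 4), ("MOBILE", 4),
   ("SOFTWARE", 5), ("APP", 5),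
   ("DISK", 6),
   ("PRINTER", 7), ("JAM", 7),
   ("VIRTUAL", 8), ("HARDWARE", 9)]

def pvLetters : List String := ["S", "L", "D", "N", "M", "A", "T", "P", "V", "H", "O"]

-- one 'for kw, p in KEYS: if p < best and kw in s: best = p' loop of Source B
def pvScan (keys : List (String × Int)) (s : String) (b : Int) : Int :=
  keys.foldl (fun acc e => if e.2 < acc ∧ PySem.Str.isIn e.1 s = true then e.2 else acc) b

def get_asset_letter_alt (category : Option String) (subject : Option String) : String :=
  let cat := PySem.Str.upper (category.getD "")
  let sub := PySem.Str.upper (subject.getD "")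
  let best := pvScan pvCatKeys cat 10
  let best := pvScan pvSubKeys sub best
  -- LETTERS[best]: best always lies in [0, 10], so the index is in range and Python never
  -- raises; .getD "" totalises the unreachable out-of-range case.
  (PySem.List.pyGet? pvLetters best).getD ""

-- ===== PRECONDITION & SPEC =====
def Spec_get_asset_letter (category : Option String) (subject : Option String) (out : String) : Prop := out = get_asset_letter_alt category subject
instance (category : Option String) (subject : Option String) (out : String) : Decidable (Spec_get_asset_letter category subject out) := by unfold Spec_get_asset_letter; infer_instance

-- ===== CLAIM (what is proved, stated in full; the proofs are below) =====
def Claim_equal_get_asset_letter : Prop := ∀ (category : Option String) (subject : Option String), Dom_get_asset_letter category subject → Spec_get_asset_letter category subject (get_asset_letter category subject)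

-- ===== LEMMAS AND PROOFS =====

theorem pvScan_le (keys : List (String × Int)) (s : String) (b : Int) : pvScan keys s b ≤ b := by
  induction keys generalizing b with
  | nil => exact le_refl b
  | cons x t ih =>
    show List.foldl _ (if x.2 < b ∧ PySem.Str.isIn x.1 s = true then x.2 else b) t ≤ b
    split_ifs with h
    · exact le_trans (ih x.2) (le_of_lt h.1)
    · exact ih b

theorem pvScan_le_of_mem (keys : List (String × Int)) (s : String) (b : Int)
    (e : String × Int) (he : e ∈ keys) (hm : PySem.Str.isIn e.1 s = true) :
    pvScan keys s b ≤ e.2 := by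
  induction keys generalizing b with
  | nil => cases he
  | cons x t ih =>
    rw [show pvScan (x :: t) s b = pvScan t s (if x.2 < b ∧ PySem.Str.isIn x.1 s = true then x.2 else b) from rfl]
    rcases List.mem_cons.mp he with rfl | he'
    · split_ifs with h
      · exact pvScan_le t s e.2
      · have hb : b ≤ e.2 := by
          by_contra hlt
          exact h ⟨by omega, hm⟩
        exact le_trans (pvScan_le t s b) hb
    · split_ifs with h
      · exact ih x.2 he'
      · exact ih b he'

theorem pvScan_cases (keys : List (String × Int)) (s : String) (b : Int) :
    pvScan keys s b = b ∨ ∃ e ∈ keys, PySem.Str.isIn e.1 s = true ∧ pvScan keys s b = e.2 := by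
  induction keys generalizing b with
  | nil => exact Or.inl rfl
  | cons x t ih =>
    rw [show pvScan (x :: t) s b = pvScan t s (if x.2 < b ∧ PySem.Str.isIn x.1 s = true then x.2 else b) from rfl]
    split_ifs with h
    · rcases ih x.2 with h' | ⟨e, he, hm, hr⟩
      · exact Or.inr ⟨x, List.mem_cons_self .., h.2, h'⟩
      · exact Or.inr ⟨e, List.mem_cons_of_mem x he, hm, hr⟩
    · rcases ih b with h' | ⟨e, he, hm, hr⟩
      · exact Or.inl h'
      · exact Or.inr ⟨e, List.mem_cons_of_mem x he, hm, hr⟩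

theorem pvResult_eq (cat sub : String) (k : Int) (hk9 : k ≤ 9)
    (hub : pvScan pvSubKeys sub (pvScan pvCatKeys cat 10) ≤ k)
    (hcat : ∀ e ∈ pvCatKeys, PySem.Str.isIn e.1 cat = true → k ≤ e.2)
    (hsub : ∀ e ∈ pvSubKeys, PySem.Str.isIn e.1 sub = true → k ≤ e.2) :
    pvScan pvSubKeys sub (pvScan pvCatKeys cat 10) = k := by
  have hlb : k ≤ pvScan pvSubKeys sub (pvScan pvCatKeys cat 10) := by
    rcases pvScan_cases pvSubKeys sub (pvScan pvCatKeys cat 10) with h | ⟨e, he, hm, hr⟩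
    · rw [h]
      rcases pvScan_cases pvCatKeys cat 10 with h' | ⟨e, he, hm, hr⟩
      · rw [h']; omega
      · rw [hr]; exact hcat e he hm
    · rw [hr]; exact hsub e he hm
  omega

theorem pvHub_cat (cat sub kw : String) (k : Int) (he : (kw, k) ∈ pvCatKeys)
    (hm : PySem.Str.isIn kw cat = true) :
    pvScan pvSubKeys sub (pvScan pvCatKeys cat 10) ≤ k :=
  le_trans (pvScan_le pvSubKeys sub _) (pvScan_le_of_mem pvCatKeys cat 10 (kw, k) he hm)

theorem pvHub_sub (cat sub kw : String) (k : Int) (he : (kw, k) ∈ pvSubKeys)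
    (hm : PySem.Str.isIn kw sub = true) :
    pvScan pvSubKeys sub (pvScan pvCatKeys cat 10) ≤ k :=
  pvScan_le_of_mem pvSubKeys sub _ (kw, k) he hm

theorem pvScan_id (keys : List (String × Int)) (s : String) (b : Int)
    (h : ∀ e ∈ keys, PySem.Str.isIn e.1 s = false) : pvScan keys s b = b := by
  rcases pvScan_cases keys s b with h' | ⟨e, he, hm, _⟩
  · exact h'
  · rw [h e he] at hm; cases hm

-- ===== VERDICT (by name: the statement is the Claim_ definition above) =====
set_option maxHeartbeats 4000000 in
theorem get_asset_letter_spec : Claim_equal_get_asset_letter := by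
  intro category subject _
  unfold Spec_get_asset_letter get_asset_letter get_asset_letter_alt
  generalize PySem.Str.upper (category.getD "") = cat
  generalize PySem.Str.upper (subject.getD "") = sub
  simp only [List.any_cons, List.any_nil, Bool.or_false]
  split_ifs with h0 h1 h2 h3 h4 h5 h6 h7 h8 h9
  all_goals simp only [Bool.or_eq_true, not_or, Bool.not_eq_true] at *
  · have hc : ∀ e ∈ pvCatKeys, PySem.Str.isIn e.1 cat = true → (0:Int) ≤ e.2 := by
      intro e he hm
      simp only [pvCatKeys, List.mem_cons, List.not_mem_nil, or_false] at he
      rcases he with rfl|rfl|rfl|rfl|rfl|rfl|rfl|rfl|rfl|rfl|rfl|rfl|rfl|rfl|rfl|rfl|rfl|rfl|rfl|rfl|rfl <;> omega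
    have hs : ∀ e ∈ pvSubKeys, PySem.Str.isIn e.1 sub = true → (0:Int) ≤ e.2 := by
      intro e he hm
      simp only [pvSubKeys, List.mem_cons, List.not_mem_nil, or_false] at he
      rcases he with rfl|rfl|rfl|rfl|rfl|rfl|rfl|rfl|rfl|rfl|rfl|rfl|rfl|rfl <;> omega
    have hr : pvScan pvSubKeys sub (pvScan pvCatKeys cat 10) = 0 := by
      rcases h0 with (h)|(h)
      · exact pvResult_eq cat sub 0 (by norm_num) (pvHub_cat cat sub "SERVER" 0 (by decide) h) hc hs
      · exact pvResult_eq cat sub 0 (by norm_num) (pvHub_sub cat sub "SERVER" 0 (by decide) h) hc hs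
    rw [hr]; decide
  · have hc : ∀ e ∈ pvCatKeys, PySem.Str.isIn e.1 cat = true → (1:Int) ≤ e.2 := by
      intro e he hm
      simp only [pvCatKeys, List.mem_cons, List.not_mem_nil, or_false] at he
      rcases he with rfl|rfl|rfl|rfl|rfl|rfl|rfl|rfl|rfl|rfl|rfl|rfl|rfl|rfl|rfl|rfl|rfl|rfl|rfl|rfl|rfl <;> first | omega | simp_all
    have hs : ∀ e ∈ pvSubKeys, PySem.Str.isIn e.1 sub = true → (1:Int) ≤ e.2 := by
      intro e he hm
      simp only [pvSubKeys, List.mem_cons, List.not_mem_nil, or_false] at he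
      rcases he with rfl|rfl|rfl|rfl|rfl|rfl|rfl|rfl|rfl|rfl|rfl|rfl|rfl|rfl <;> first | omega | simp_all
    have hr : pvScan pvSubKeys sub (pvScan pvCatKeys cat 10) = 1 := by
      rcases h1 with (h)|(h)
      · exact pvResult_eq cat sub 1 (by norm_num) (pvHub_cat cat sub "LAPTOP" 1 (by decide) h) hc hs
      · exact pvResult_eq cat sub 1 (by norm_num) (pvHub_sub cat sub "LAPTOP" 1 (by decide) h) hc hs
    rw [hr]; decide
  · have hc : ∀ e ∈ pvCatKeys, PySem.Str.isIn e.1 cat = true → (2:Int) ≤ e.2 := by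
      intro e he hm
      simp only [pvCatKeys, List.mem_cons, List.not_mem_nil, or_false] at he
      rcases he with rfl|rfl|rfl|rfl|rfl|rfl|rfl|rfl|rfl|rfl|rfl|rfl|rfl|rfl|rfl|rfl|rfl|rfl|rfl|rfl|rfl <;> first | omega | simp_all
    have hs : ∀ e ∈ pvSubKeys, PySem.Str.isIn e.1 sub = true → (2:Int) ≤ e.2 := by
      intro e he hm
      simp only [pvSubKeys, List.mem_cons, List.not_mem_nil, or_false] at he
      rcases he with rfl|rfl|rfl|rfl|rfl|rfl|rfl|rfl|rfl|rfl|rfl|rfl|rfl|rfl <;> first | omega | simp_all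
    have hr : pvScan pvSubKeys sub (pvScan pvCatKeys cat 10) = 2 := by
      rcases h2 with (h)|(h)
      · exact pvResult_eq cat sub 2 (by norm_num) (pvHub_cat cat sub "DESKTOP" 2 (by decide) h) hc hs
      · exact pvResult_eq cat sub 2 (by norm_num) (pvHub_sub cat sub "DESKTOP" 2 (by decide) h) hc hs
    rw [hr]; decide
  · have hc : ∀ e ∈ pvCatKeys, PySem.Str.isIn e.1 cat = true → (3:Int) ≤ e.2 := by
      intro e he hm
      simp only [pvCatKeys, List.mem_cons, List.not_mem_nil, or_false] at he
      rcases he with rfl|rfl|rfl|rfl|rfl|rfl|rfl|rfl|rfl|rfl|rfl|rfl|rfl|rfl|rfl|rfl|rfl|rfl|rfl|rfl|rfl <;> first | omega | simp_all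
    have hs : ∀ e ∈ pvSubKeys, PySem.Str.isIn e.1 sub = true → (3:Int) ≤ e.2 := by
      intro e he hm
      simp only [pvSubKeys, List.mem_cons, List.not_mem_nil, or_false] at he
      rcases he with rfl|rfl|rfl|rfl|rfl|rfl|rfl|rfl|rfl|rfl|rfl|rfl|rfl|rfl <;> first | omega | simp_all
    have hr : pvScan pvSubKeys sub (pvScan pvCatKeys cat 10) = 3 := by
      rcases h3 with (h|h|h)|(h|h)
      · exact pvResult_eq cat sub 3 (by norm_num) (pvHub_cat cat sub "NETWORK" 3 (by decide) h) hc hs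
      · exact pvResult_eq cat sub 3 (by norm_num) (pvHub_cat cat sub "WIFI" 3 (by decide) h) hc hs
      · exact pvResult_eq cat sub 3 (by norm_num) (pvHub_cat cat sub "VPN" 3 (by decide) h) hc hs
      · exact pvResult_eq cat sub 3 (by norm_num) (pvHub_sub cat sub "NETWORK" 3 (by decide) h) hc hs
      · exact pvResult_eq cat sub 3 (by norm_num) (pvHub_sub cat sub "WIFI" 3 (by decide) h) hc hs
    rw [hr]; decide
  · have hc : ∀ e ∈ pvCatKeys, PySem.Str.isIn e.1 cat = true → (4:Int) ≤ e.2 := by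
      intro e he hm
      simp only [pvCatKeys, List.mem_cons, List.not_mem_nil, or_false] at he
      rcases he with rfl|rfl|rfl|rfl|rfl|rfl|rfl|rfl|rfl|rfl|rfl|rfl|rfl|rfl|rfl|rfl|rfl|rfl|rfl|rfl|rfl <;> first | omega | simp_all
    have hs : ∀ e ∈ pvSubKeys, PySem.Str.isIn e.1 sub = true → (4:Int) ≤ e.2 := by
      intro e he hm
      simp only [pvSubKeys, List.mem_cons, List.not_mem_nil, or_false] at he
      rcases he with rfl|rfl|rfl|rfl|rfl|rfl|rfl|rfl|rfl|rfl|rfl|rfl|rfl|rfl <;> first | omega | simp_all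
    have hr : pvScan pvSubKeys sub (pvScan pvCatKeys cat 10) = 4 := by
      rcases h4 with (h|h)|(h|h)
      · exact pvResult_eq cat sub 4 (by norm_num) (pvHub_cat cat sub "MOBILE" 4 (by decide) h) hc hs
      · exact pvResult_eq cat sub 4 (by norm_num) (pvHub_cat cat sub "PHONE" 4 (by decide) h) hc hs
      · exact pvResult_eq cat sub 4 (by norm_num) (pvHub_sub cat sub "PHONE" 4 (by decide) h) hc hs
      · exact pvResult_eq cat sub 4 (by norm_num) (pvHub_sub cat sub "MOBILE" 4 (by decide) h) hc hs
    rw [hr]; decide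
  · have hc : ∀ e ∈ pvCatKeys, PySem.Str.isIn e.1 cat = true → (5:Int) ≤ e.2 := by
      intro e he hm
      simp only [pvCatKeys, List.mem_cons, List.not_mem_nil, or_false] at he
      rcases he with rfl|rfl|rfl|rfl|rfl|rfl|rfl|rfl|rfl|rfl|rfl|rfl|rfl|rfl|rfl|rfl|rfl|rfl|rfl|rfl|rfl <;> first | omega | simp_all
    have hs : ∀ e ∈ pvSubKeys, PySem.Str.isIn e.1 sub = true → (5:Int) ≤ e.2 := by
      intro e he hm
      simp only [pvSubKeys, List.mem_cons, List.not_mem_nil, or_false] at he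
      rcases he with rfl|rfl|rfl|rfl|rfl|rfl|rfl|rfl|rfl|rfl|rfl|rfl|rfl|rfl <;> first | omega | simp_all
    have hr : pvScan pvSubKeys sub (pvScan pvCatKeys cat 10) = 5 := by
      rcases h5 with (h|h|h)|(h|h)
      · exact pvResult_eq cat sub 5 (by norm_num) (pvHub_cat cat sub "SOFTWARE" 5 (by decide) h) hc hs
      · exact pvResult_eq cat sub 5 (by norm_num) (pvHub_cat cat sub "APP" 5 (by decide) h) hc hs
      · exact pvResult_eq cat sub 5 (by norm_num) (pvHub_cat cat sub "LICENSE" 5 (by decide) h) hc hs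
      · exact pvResult_eq cat sub 5 (by norm_num) (pvHub_sub cat sub "SOFTWARE" 5 (by decide) h) hc hs
      · exact pvResult_eq cat sub 5 (by norm_num) (pvHub_sub cat sub "APP" 5 (by decide) h) hc hs
    rw [hr]; decide
  · have hc : ∀ e ∈ pvCatKeys, PySem.Str.isIn e.1 cat = true → (6:Int) ≤ e.2 := by
      intro e he hm
      simp only [pvCatKeys, List.mem_cons, List.not_mem_nil, or_false] at he
      rcases he with rfl|rfl|rfl|rfl|rfl|rfl|rfl|rfl|rfl|rfl|rfl|rfl|rfl|rfl|rfl|rfl|rfl|rfl|rfl|rfl|rfl <;> first | omega | simp_all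
    have hs : ∀ e ∈ pvSubKeys, PySem.Str.isIn e.1 sub = true → (6:Int) ≤ e.2 := by
      intro e he hm
      simp only [pvSubKeys, List.mem_cons, List.not_mem_nil, or_false] at he
      rcases he with rfl|rfl|rfl|rfl|rfl|rfl|rfl|rfl|rfl|rfl|rfl|rfl|rfl|rfl <;> first | omega | simp_all
    have hr : pvScan pvSubKeys sub (pvScan pvCatKeys cat 10) = 6 := by
      rcases h6 with (h|h|h)|(h)
      · exact pvResult_eq cat sub 6 (by norm_num) (pvHub_cat cat sub "STORAGE" 6 (by decide) h) hc hs
      · exact pvResult_eq cat sub 6 (by norm_num) (pvHub_cat cat sub "DRIVE" 6 (by decide) h) hc hs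
      · exact pvResult_eq cat sub 6 (by norm_num) (pvHub_cat cat sub "NAS" 6 (by decide) h) hc hs
      · exact pvResult_eq cat sub 6 (by norm_num) (pvHub_sub cat sub "DISK" 6 (by decide) h) hc hs
    rw [hr]; decide
  · have hc : ∀ e ∈ pvCatKeys, PySem.Str.isIn e.1 cat = true → (7:Int) ≤ e.2 := by
      intro e he hm
      simp only [pvCatKeys, List.mem_cons, List.not_mem_nil, or_false] at he
      rcases he with rfl|rfl|rfl|rfl|rfl|rfl|rfl|rfl|rfl|rfl|rfl|rfl|rfl|rfl|rfl|rfl|rfl|rfl|rfl|rfl|rfl <;> first | omega | simp_all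
    have hs : ∀ e ∈ pvSubKeys, PySem.Str.isIn e.1 sub = true → (7:Int) ≤ e.2 := by
      intro e he hm
      simp only [pvSubKeys, List.mem_cons, List.not_mem_nil, or_false] at he
      rcases he with rfl|rfl|rfl|rfl|rfl|rfl|rfl|rfl|rfl|rfl|rfl|rfl|rfl|rfl <;> first | omega | simp_all
    have hr : pvScan pvSubKeys sub (pvScan pvCatKeys cat 10) = 7 := by
      rcases h7 with (h|h|h|h)|(h|h)
      · exact pvResult_eq cat sub 7 (by norm_num) (pvHub_cat cat sub "PERIPHERAL" 7 (by decide) h) hc hs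
      · exact pvResult_eq cat sub 7 (by norm_num) (pvHub_cat cat sub "PRINTER" 7 (by decide) h) hc hs
      · exact pvResult_eq cat sub 7 (by norm_num) (pvHub_cat cat sub "MOUSE" 7 (by decide) h) hc hs
      · exact pvResult_eq cat sub 7 (by norm_num) (pvHub_cat cat sub "KEYBOARD" 7 (by decide) h) hc hs
      · exact pvResult_eq cat sub 7 (by norm_num) (pvHub_sub cat sub "PRINTER" 7 (by decide) h) hc hs
      · exact pvResult_eq cat sub 7 (by norm_num) (pvHub_sub cat sub "JAM" 7 (by decide) h) hc hs
    rw [hr]; decide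
  · have hc : ∀ e ∈ pvCatKeys, PySem.Str.isIn e.1 cat = true → (8:Int) ≤ e.2 := by
      intro e he hm
      simp only [pvCatKeys, List.mem_cons, List.not_mem_nil, or_false] at he
      rcases he with rfl|rfl|rfl|rfl|rfl|rfl|rfl|rfl|rfl|rfl|rfl|rfl|rfl|rfl|rfl|rfl|rfl|rfl|rfl|rfl|rfl <;> first | omega | simp_all
    have hs : ∀ e ∈ pvSubKeys, PySem.Str.isIn e.1 sub = true → (8:Int) ≤ e.2 := by
      intro e he hm
      simp only [pvSubKeys, List.mem_cons, List.not_mem_nil, or_false] at he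
      rcases he with rfl|rfl|rfl|rfl|rfl|rfl|rfl|rfl|rfl|rfl|rfl|rfl|rfl|rfl <;> first | omega | simp_all
    have hr : pvScan pvSubKeys sub (pvScan pvCatKeys cat 10) = 8 := by
      rcases h8 with (h|h)|h
      · exact pvResult_eq cat sub 8 (by norm_num) (pvHub_cat cat sub "VIRTUAL" 8 (by decide) h) hc hs
      · exact pvResult_eq cat sub 8 (by norm_num) (pvHub_cat cat sub "VM" 8 (by decide) h) hc hs
      · exact pvResult_eq cat sub 8 (by norm_num) (pvHub_sub cat sub "VIRTUAL" 8 (by decide) h) hc hs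
    rw [hr]; decide
  · have hc : ∀ e ∈ pvCatKeys, PySem.Str.isIn e.1 cat = true → (9:Int) ≤ e.2 := by
      intro e he hm
      simp only [pvCatKeys, List.mem_cons, List.not_mem_nil, or_false] at he
      rcases he with rfl|rfl|rfl|rfl|rfl|rfl|rfl|rfl|rfl|rfl|rfl|rfl|rfl|rfl|rfl|rfl|rfl|rfl|rfl|rfl|rfl <;> first | omega | simp_all
    have hs : ∀ e ∈ pvSubKeys, PySem.Str.isIn e.1 sub = true → (9:Int) ≤ e.2 := by
      intro e he hm
      simp only [pvSubKeys, List.mem_cons, List.not_mem_nil, or_false] at he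
      rcases he with rfl|rfl|rfl|rfl|rfl|rfl|rfl|rfl|rfl|rfl|rfl|rfl|rfl|rfl <;> first | omega | simp_all
    have hr : pvScan pvSubKeys sub (pvScan pvCatKeys cat 10) = 9 := by
      rcases h9 with (h)|(h)
      · exact pvResult_eq cat sub 9 (by norm_num) (pvHub_cat cat sub "HARDWARE" 9 (by decide) h) hc hs
      · exact pvResult_eq cat sub 9 (by norm_num) (pvHub_sub cat sub "HARDWARE" 9 (by decide) h) hc hs
    rw [hr]; decide
  · rw [pvScan_id pvSubKeys sub _ (by
          intro e he
          simp only [pvSubKeys, List.mem_cons, List.not_mem_nil, or_false] at he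
          rcases he with rfl|rfl|rfl|rfl|rfl|rfl|rfl|rfl|rfl|rfl|rfl|rfl|rfl|rfl <;> simp_all),
        pvScan_id pvCatKeys cat 10 (by
          intro e he
          simp only [pvCatKeys, List.mem_cons, List.not_mem_nil, or_false] at he
          rcases he with rfl|rfl|rfl|rfl|rfl|rfl|rfl|rfl|rfl|rfl|rfl|rfl|rfl|rfl|rfl|rfl|rfl|rfl|rfl|rfl|rfl <;> simp_all)]
    decide
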